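-- pv_equiv track=rewrite | github.com/jkaria/coding-practice | python3/leet_code/max_area.py | max_rectangle_in_matrix
-- ===== SOURCE A (Python) =====
-- def max_rectangle_in_matrix(matrix):
--     if matrix == [] or matrix == [[]]:
--         return 0
--
--     heights, max_area = [0] * len(matrix[0]), 0
--
--     for row in matrix:
--         for i in range(len(row)):
--             heights[i] = heights[i] + 1 if row[i] == '1' else 0
--         prev_ht_idxs = []
--         for i, ht in enumerate(heights + [0]):
--             while prev_ht_idxs and heights[prev_ht_idxs[-1]] >= ht:
--                 h = heights[prev_ht_idxs.pop()]
--                 w = i - prev_ht_idxs[-1] - 1 if prev_ht_idxs else i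
--                 max_area = max(h * w, max_area)
--             prev_ht_idxs.append(i)
--
--     return max_area
-- ===== SOURCE B (Python) =====
-- def max_rectangle_in_matrix(matrix):
--     if not matrix:
--         return 0
--     n = len(matrix[0])
--     heights = [0] * n
--     best = 0
--     for row in matrix:
--         for i in range(len(row)):
--             heights[i] = heights[i] + 1 if row[i] == '1' else 0
--         for j in range(n):
--             hj = heights[j]
--             l = j
--             while l > 0 and heights[l - 1] >= hj:
--                 l -= 1
--             r = j + 1
--             while r < n and heights[r] > hj:
--                 r += 1
--             best = max(best, hj * (r - l))
--     return best
-- ===== Notes on version B (the rewrite author's own statement) =====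
-- stated objective: alternative
-- what changed: Replaces the per-row monotonic-stack histogram sweep (sentinel bar, pop-time width computation) by a per-bar expansion: for each bar of the histogram the maximal left boundary (first strictly smaller bar to the left) and right boundary (first smaller-or-equal bar to the right) are found by direct scans and the area heights[j]*(r-l) is maximised.
import Mathlib
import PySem

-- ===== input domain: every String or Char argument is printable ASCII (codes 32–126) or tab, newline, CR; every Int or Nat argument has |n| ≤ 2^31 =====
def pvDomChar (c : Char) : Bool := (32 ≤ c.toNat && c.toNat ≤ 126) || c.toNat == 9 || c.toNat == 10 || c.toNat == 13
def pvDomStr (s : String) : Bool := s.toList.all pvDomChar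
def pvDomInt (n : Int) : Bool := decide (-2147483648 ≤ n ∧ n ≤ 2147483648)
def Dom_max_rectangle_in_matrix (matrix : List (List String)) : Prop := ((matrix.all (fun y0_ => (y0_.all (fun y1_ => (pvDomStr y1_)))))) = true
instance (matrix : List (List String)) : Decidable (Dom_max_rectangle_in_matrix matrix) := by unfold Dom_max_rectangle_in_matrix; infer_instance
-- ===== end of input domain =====

-- B replaces A's per-row monotonic-stack histogram sweep by per-bar left/right boundary
-- scans (alternative algorithm, same results; not claimed faster).

-- ===== PORT A =====
-- the in-place height update loop: `for i in range(len(row)): heights[i] = heights[i] + 1 if row[i] == '1' else 0`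
-- (this loop is textually identical in A and in B, so both ports share it)
def pvHeightsUpd (h : List Int) (row : List String) : List Int :=
  (PySem.List.pyRange 0 row.length 1).foldl
    (fun h i => PySem.List.pySetD h i
      (if PySem.List.pyGetD row i "" = "1" then PySem.List.pyGetD h i 0 + 1 else 0)) h

-- the `while prev_ht_idxs and heights[prev_ht_idxs[-1]] >= ht:` loop; the stack top is the list head
def pvPopA (h : List Int) (i ht : Int) : List Int → Int → List Int × Int
  | [], acc => ([], acc)
  | p :: rest, acc =>
    if ht ≤ PySem.List.pyGetD h p 0 then
      pvPopA h i ht rest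
        (max (PySem.List.pyGetD h p 0 * (match rest with | q :: _ => i - q - 1 | [] => i)) acc)
    else (p :: rest, acc)

def pvRowA (st : List Int × Int) (row : List String) : List Int × Int :=
  let h := pvHeightsUpd st.1 row
  let r := (PySem.List.enumerate (h ++ [0])).foldl
    (fun (sa : List Int × Int) (p : Int × Int) =>
      let z := pvPopA h p.1 p.2 sa.1 sa.2
      (p.1 :: z.1, z.2)) ([], st.2)
  (h, r.2)

def max_rectangle_in_matrix (matrix : List (List String)) : Int :=
  if matrix = [] ∨ matrix = [[]] then 0
  else (matrix.foldl pvRowA (List.replicate (matrix.headD []).length 0, 0)).2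

-- ===== PORT B =====
-- `l = j; while l > 0 and heights[l-1] >= hj: l -= 1`
def pvLeftScan (h : List Int) (hj : Int) : Nat → Nat
  | 0 => 0
  | l + 1 => if hj ≤ h.getD l 0 then pvLeftScan h hj l else l + 1

-- `r = j + 1; while r < n and heights[r] > hj: r += 1`
def pvRightScan (h : List Int) (hj : Int) (n r : Nat) : Nat :=
  if r < n then (if hj < h.getD r 0 then pvRightScan h hj n (r + 1) else r) else r
termination_by n - r

def pvRowB (h : List Int) (best : Int) : Int :=
  (List.range h.length).foldl (fun b j =>
    max b (h.getD j 0 *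
      ((pvRightScan h (h.getD j 0) h.length (j + 1) : Int) - (pvLeftScan h (h.getD j 0) j : Int)))) best

def max_rectangle_in_matrix_alt (matrix : List (List String)) : Int :=
  if matrix = [] then 0
  else (matrix.foldl (fun (st : List Int × Int) row =>
      let h := pvHeightsUpd st.1 row
      (h, pvRowB h st.2)) (List.replicate (matrix.headD []).length 0, 0)).2

-- ===== PRECONDITION & SPEC =====
-- Pre_ excludes exactly the matrices in which some row is longer than the first row:
-- there Python A (and Python B alike) raises IndexError on `heights[i]`.
def Pre_max_rectangle_in_matrix (matrix : List (List String)) : Prop :=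
  ∀ r ∈ matrix, r.length ≤ (matrix.headD []).length
instance (matrix : List (List String)) : Decidable (Pre_max_rectangle_in_matrix matrix) := by
  unfold Pre_max_rectangle_in_matrix; infer_instance

def pvWitness_max_rectangle_in_matrix : List (List String) := [["1", "0"], ["1", "1"]]

def Spec_max_rectangle_in_matrix (matrix : List (List String)) (out : Int) : Prop := out = max_rectangle_in_matrix_alt matrix
instance (matrix : List (List String)) (out : Int) : Decidable (Spec_max_rectangle_in_matrix matrix out) := by unfold Spec_max_rectangle_in_matrix; infer_instance

-- ===== CLAIM (what is proved, stated in full; the proofs are below) =====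
def Claim_equal_max_rectangle_in_matrix : Prop := ∀ (matrix : List (List String)), Dom_max_rectangle_in_matrix matrix → Pre_max_rectangle_in_matrix matrix → Spec_max_rectangle_in_matrix matrix (max_rectangle_in_matrix matrix)

-- ===== LEMMAS AND PROOFS =====

-- Nat-indexed mirror of A's pop loop (the stack holds Nat indices)
def pvPopN (hs : List Int) (i : Nat) (ht : Int) : List Nat → Int → List Nat × Int
  | [], acc => ([], acc)
  | p :: rest, acc =>
    if ht ≤ hs.getD p 0 then
      pvPopN hs i ht rest
        (max (hs.getD p 0 * (match rest with | q :: _ => (i : Int) - (q : Int) - 1 | [] => (i : Int))) acc)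
    else (p :: rest, acc)

def pvStepN (hs xs : List Int) (sa : List Nat × Int) (i : Nat) : List Nat × Int :=
  (i :: (pvPopN hs i (xs.getD i 0) sa.1 sa.2).1, (pvPopN hs i (xs.getD i 0) sa.1 sa.2).2)

-- the closed form of A's stack after processing positions 0..i-1 of xs (top at head)
def pvStk (xs : List Int) (i : Nat) : List Nat :=
  ((List.range i).filter (fun j => decide (∀ t, t < i → j < t → xs.getD j 0 < xs.getD t 0))).reverse

theorem pvPopA_cons (hs : List Int) (i ht : Int) (p : Int) (rest : List Int) (acc : Int) :
    pvPopA hs i ht (p :: rest) acc =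
      if ht ≤ PySem.List.pyGetD hs p 0 then
        pvPopA hs i ht rest
          (max (PySem.List.pyGetD hs p 0 * (match rest with | q :: _ => i - q - 1 | [] => i)) acc)
      else (p :: rest, acc) := rfl

theorem pvPopN_cons (hs : List Int) (i : Nat) (ht : Int) (p : Nat) (rest : List Nat) (acc : Int) :
    pvPopN hs i ht (p :: rest) acc =
      if ht ≤ hs.getD p 0 then
        pvPopN hs i ht rest
          (max (hs.getD p 0 *
            (match rest with | q :: _ => (i : Int) - (q : Int) - 1 | [] => (i : Int))) acc)
      else (p :: rest, acc) := rfl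

-- ---- bridge: A's Int-stack fold = the Nat-indexed fold ----
theorem pop_bridge (hs : List Int) (i : Nat) (ht : Int) :
    ∀ (s : List Nat) (acc : Int),
      pvPopA hs (i : Int) ht (s.map (fun p => (p : Int))) acc =
        ((pvPopN hs i ht s acc).1.map (fun p => (p : Int)), (pvPopN hs i ht s acc).2) := by
  intro s
  induction s with
  | nil => intro acc; rfl
  | cons p rest ih =>
    intro acc
    rw [show ((p :: rest).map (fun x => (x : Int))) = (p : Int) :: rest.map (fun x => (x : Int))
      from rfl]
    rw [pvPopA_cons, pvPopN_cons]
    simp only [PySem.List.pyGetD_natCast]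
    by_cases hc : ht ≤ hs.getD p 0
    · rw [if_pos hc, if_pos hc, ← ih]
      cases rest <;> rfl
    · rw [if_neg hc, if_neg hc]
      rfl

theorem fold_bridge (hs xs : List Int) :
    ∀ (l : List Nat) (s : List Nat) (a : Int),
      l.foldl (fun (sa : List Int × Int) (k : Nat) =>
          let z := pvPopA hs (k : Int) (xs.getD k 0) sa.1 sa.2
          ((k : Int) :: z.1, z.2)) (s.map (fun p => (p : Int)), a) =
        (((l.foldl (pvStepN hs xs) (s, a)).1).map (fun p => (p : Int)),
          (l.foldl (pvStepN hs xs) (s, a)).2) := by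
  intro l
  induction l with
  | nil => intro s a; rfl
  | cons k l ih =>
    intro s a
    simp only [List.foldl_cons]
    rw [pop_bridge hs k (xs.getD k 0) s a]
    exact ih (pvStepN hs xs (s, a) k).1 (pvStepN hs xs (s, a) k).2

theorem rowA_inner (h : List Int) (a : Int) :
    ((PySem.List.enumerate (h ++ [0])).foldl
      (fun (sa : List Int × Int) (p : Int × Int) =>
        let z := pvPopA h p.1 p.2 sa.1 sa.2
        (p.1 :: z.1, z.2)) ([], a)).2 =
    ((List.range (h.length + 1)).foldl (pvStepN h (h ++ [0])) ([], a)).2 := by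
  have hstep : (PySem.List.enumerate (h ++ [0])).foldl
      (fun (sa : List Int × Int) (p : Int × Int) =>
        let z := pvPopA h p.1 p.2 sa.1 sa.2
        (p.1 :: z.1, z.2)) ([], a) =
      (List.range (h.length + 1)).foldl
        (fun (sa : List Int × Int) (k : Nat) =>
          let z := pvPopA h (k : Int) ((h ++ [0]).getD k 0) sa.1 sa.2
          ((k : Int) :: z.1, z.2)) ([], a) := by
    rw [PySem.List.enumerate_eq_map_pyRange (h ++ [0]) 0, PySem.List.pyRange_one, List.map_map,
      List.foldl_map]
    have hlen : ((PySem.List.len (h ++ [0])) - 0).toNat = h.length + 1 := by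
      simp [PySem.List.len]
    rw [hlen]
    have hfun : ∀ (l : List Nat) (sa : List Int × Int),
        l.foldl (fun (sa : List Int × Int) (k : Nat) =>
          (fun (sa : List Int × Int) (p : Int × Int) =>
            let z := pvPopA h p.1 p.2 sa.1 sa.2
            (p.1 :: z.1, z.2)) sa
              ((0 + (k : Int), PySem.List.pyGetD (h ++ [0]) (0 + (k : Int)) 0))) sa =
        l.foldl (fun (sa : List Int × Int) (k : Nat) =>
          let z := pvPopA h (k : Int) ((h ++ [0]).getD k 0) sa.1 sa.2
          ((k : Int) :: z.1, z.2)) sa := by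
      intro l
      induction l with
      | nil => intro sa; rfl
      | cons k l ih =>
        intro sa
        rw [List.foldl_cons, List.foldl_cons, ih]
        congr 2 <;> simp
    exact hfun _ _
  rw [hstep]
  exact congrArg Prod.snd
    (fold_bridge h (h ++ [0]) (List.range (h.length + 1)) [] a)

theorem rowA_eq_natfold (h0 : List Int) (a : Int) (row : List String) :
    pvRowA (h0, a) row =
      (pvHeightsUpd h0 row,
        ((List.range ((pvHeightsUpd h0 row).length + 1)).foldl
          (pvStepN (pvHeightsUpd h0 row) (pvHeightsUpd h0 row ++ [0])) ([], a)).2) := by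
  unfold pvRowA
  simp only
  rw [rowA_inner]

-- ---- stack characterisation ----
theorem mem_pvStk (xs : List Int) (i j : Nat) :
    j ∈ pvStk xs i ↔ j < i ∧ ∀ t, t < i → j < t → xs.getD j 0 < xs.getD t 0 := by
  simp [pvStk, List.mem_filter]

theorem pairwise_pvStk (xs : List Int) (i : Nat) : (pvStk xs i).Pairwise (· > ·) := by
  unfold pvStk
  rw [List.pairwise_reverse]
  exact (List.pairwise_lt_range).filter _

-- along the stack (top first), indices and their bar heights strictly decrease
theorem pairwise_pvStk_g (xs : List Int) (i : Nat) :
    (pvStk xs i).Pairwise (fun a b => b < a ∧ xs.getD b 0 < xs.getD a 0) := by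
  unfold pvStk
  rw [List.pairwise_reverse]
  refine List.Pairwise.imp_of_mem ?_ ((List.pairwise_lt_range).filter _)
  intro a b ha hb hab
  rcases List.mem_filter.mp ha with ⟨_, hap⟩
  have hbi := List.mem_range.mp (List.mem_filter.mp hb).1
  exact ⟨hab, (decide_eq_true_eq.mp hap) b hbi hab⟩

theorem filter_eq_dropWhile_not {α : Type} (Q : α → Bool) :
    ∀ (l : List α), l.Pairwise (fun a b => Q a = true → Q b = true) →
      l.filter Q = l.dropWhile (fun x => !Q x) := by
  intro l
  induction l with
  | nil => intro _; rfl
  | cons x t ih =>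
    intro hp
    rcases List.pairwise_cons.mp hp with ⟨hx, ht⟩
    by_cases hq : Q x = true
    · rw [List.filter_cons_of_pos hq, List.dropWhile_cons,
        show (!Q x) = false by rw [hq]; rfl]
      simp only [Bool.false_eq_true, if_false]
      rw [List.filter_eq_self.mpr (fun b hb => hx b hb hq)]
    · rw [List.filter_cons_of_neg hq, List.dropWhile_cons,
        show (!Q x) = true by rw [Bool.not_eq_true']; exact Bool.eq_false_iff.mpr hq]
      simp only [if_true]
      exact ih ht

theorem pvPopN_fst (hs : List Int) (i : Nat) (ht : Int) :
    ∀ (s : List Nat) (acc : Int),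
      (pvPopN hs i ht s acc).1 = s.dropWhile (fun j => decide (ht ≤ hs.getD j 0)) := by
  intro s
  induction s with
  | nil => intro acc; rfl
  | cons p rest ih =>
    intro acc
    rw [pvPopN_cons, List.dropWhile_cons]
    by_cases hc : ht ≤ hs.getD p 0
    · rw [if_pos hc, decide_eq_true hc, if_pos rfl]
      exact ih _
    · rw [if_neg hc, decide_eq_false hc]
      simp

theorem dropWhile_congr' {α : Type} {p q : α → Bool} :
    ∀ l : List α, (∀ x ∈ l, p x = q x) → l.dropWhile p = l.dropWhile q := by
  intro l
  induction l with
  | nil => intro _; rfl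
  | cons x t ih =>
    intro hpq
    rw [List.dropWhile_cons, List.dropWhile_cons, hpq x List.mem_cons_self]
    split
    · exact ih (fun y hy => hpq y (List.mem_cons_of_mem _ hy))
    · rfl

theorem pvStk_succ (hs : List Int) (i : Nat) (hi : i ≤ hs.length) :
    pvStk (hs ++ [0]) (i + 1) =
      i :: (pvStk (hs ++ [0]) i).dropWhile (fun j => decide ((hs ++ [0]).getD i 0 ≤ hs.getD j 0)) := by
  set xs := hs ++ [0] with hxs
  have step1 : pvStk xs (i + 1) =
      i :: (pvStk xs i).filter (fun j => decide (xs.getD j 0 < xs.getD i 0)) := by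
    unfold pvStk
    rw [List.range_succ, List.filter_append, List.reverse_append]
    have hi' : (List.filter (fun j => decide (∀ t, t < i + 1 → j < t → xs.getD j 0 < xs.getD t 0))
        [i]) = [i] := by
      simp only [List.filter_cons, List.filter_nil]
      rw [if_pos (by simp; intro t h1 h2; omega)]
    rw [hi']
    simp only [List.reverse_cons, List.reverse_nil, List.nil_append, List.cons_append]
    congr 1
    have hfe : (List.range i).filter
        (fun j => decide (∀ t, t < i + 1 → j < t → xs.getD j 0 < xs.getD t 0)) =
        (List.range i).filter (fun j =>
          decide (xs.getD j 0 < xs.getD i 0) &&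
          decide (∀ t, t < i → j < t → xs.getD j 0 < xs.getD t 0)) := by
      apply List.filter_congr
      intro j hj
      have hjlt := List.mem_range.mp hj
      rw [Bool.eq_iff_iff]
      simp only [decide_eq_true_eq, Bool.and_eq_true]
      constructor
      · intro hall
        exact ⟨hall i (by omega) hjlt, fun t h1 h2 => hall t (by omega) h2⟩
      · rintro ⟨h2, h1⟩
        intro t ht1 ht2
        rcases Nat.lt_or_ge t i with h3 | h3
        · exact h1 t h3 ht2
        · have : t = i := by omega
          subst this
          exact h2
    rw [hfe, ← List.filter_filter, List.filter_reverse]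
  rw [step1]
  congr 1
  have hQchain : (pvStk xs i).Pairwise
      (fun a b => (fun j => decide (xs.getD j 0 < xs.getD i 0)) a = true →
        (fun j => decide (xs.getD j 0 < xs.getD i 0)) b = true) := by
    refine (pairwise_pvStk_g xs i).imp ?_
    intro a b hab
    simp only [decide_eq_true_eq]
    intro h
    exact lt_trans hab.2 h
  rw [filter_eq_dropWhile_not _ _ hQchain]
  apply dropWhile_congr'
  intro j hj
  have hjlt : j < i := ((mem_pvStk xs i j).mp hj).1
  have hjn : j < hs.length := by omega
  have hget : xs.getD j 0 = hs.getD j 0 := by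
    rw [hxs]
    rw [List.getD_append _ _ _ _ hjn]
  rw [hget, ← decide_not]
  exact decide_eq_decide.mpr (by omega)

theorem stack_run (hs : List Int) (a : Int) :
    ∀ i, i ≤ hs.length + 1 →
      ((List.range i).foldl (pvStepN hs (hs ++ [0])) ([], a)).1 = pvStk (hs ++ [0]) i := by
  intro i
  induction i with
  | zero => intro _; rfl
  | succ i ih =>
    intro hi
    rw [List.range_succ, List.foldl_append, List.foldl_cons, List.foldl_nil]
    have hstk := ih (by omega)
    rcases heq : ((List.range i).foldl (pvStepN hs (hs ++ [0])) ([], a)) with ⟨st, ac⟩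
    rw [heq] at hstk
    simp only at hstk
    subst hstk
    show (pvStepN hs (hs ++ [0]) (pvStk (hs ++ [0]) i, ac) i).1 = _
    unfold pvStepN
    simp only
    rw [pvPopN_fst]
    exact (pvStk_succ hs i (by omega)).symm

-- ---- gap lemma: between adjacent stack entries all bars are at least as high as the upper entry ----
theorem gap_ge (xs : List Int) (i a : Nat) (Lo : Nat → Prop)
    (ha : a ∈ pvStk xs i)
    (hup : ∀ t u, Lo t → t ≤ u → Lo u)
    (hnm : ∀ t, Lo t → t < a → t ∉ pvStk xs i) :
    ∀ t, Lo t → t < a → xs.getD a 0 ≤ xs.getD t 0 := by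
  have hai : a < i := ((mem_pvStk xs i a).mp ha).1
  have hprop := ((mem_pvStk xs i a).mp ha).2
  have H : ∀ k t, a - t ≤ k → Lo t → t < a → xs.getD a 0 ≤ xs.getD t 0 := by
    intro k
    induction k with
    | zero => intro t hk hLo hta; omega
    | succ k ihk =>
      intro t hk hLo hta
      by_contra hlt
      rw [not_le] at hlt
      have htmem : t ∈ pvStk xs i := by
        rw [mem_pvStk]
        refine ⟨by omega, ?_⟩
        intro u hu htu
        rcases Nat.lt_trichotomy u a with h1 | h1 | h1
        · have := ihk u (by omega) (hup t u hLo (by omega)) h1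
          omega
        · subst h1; omega
        · have := hprop u hu h1
          omega
      exact hnm t hLo hta htmem
  intro t hLo hta
  exact H (a - t) t (le_refl _) hLo hta

theorem suffix_no_between (xs : List Int) (i : Nat) (a b : Nat) (s2 : List Nat)
    (hs : (a :: b :: s2) <:+ pvStk xs i) :
    ∀ t, b < t → t < a → t ∉ pvStk xs i := by
  rcases hs with ⟨pre, hpre⟩
  intro t htb hta hmem
  have hpw := pairwise_pvStk xs i
  rw [← hpre] at hpw hmem
  rcases List.mem_append.mp hmem with hp | hc
  · rcases List.pairwise_append.mp hpw with ⟨_, _, hcross⟩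
    have := hcross t hp a (by simp)
    omega
  · rcases List.pairwise_append.mp hpw with ⟨_, hsuf, _⟩
    rcases List.mem_cons.mp hc with rfl | hc2
    · omega
    rcases List.mem_cons.mp hc2 with rfl | hc3
    · omega
    · rcases List.pairwise_cons.mp hsuf with ⟨_, hsuf2⟩
      rcases List.pairwise_cons.mp hsuf2 with ⟨hb, _⟩
      have := hb t hc3
      omega

theorem suffix_no_below (xs : List Int) (i : Nat) (a : Nat)
    (hs : [a] <:+ pvStk xs i) :
    ∀ t, t < a → t ∉ pvStk xs i := by
  rcases hs with ⟨pre, hpre⟩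
  intro t hta hmem
  have hpw := pairwise_pvStk xs i
  rw [← hpre] at hpw hmem
  rcases List.mem_append.mp hmem with hp | hc
  · rcases List.pairwise_append.mp hpw with ⟨_, _, hcross⟩
    have := hcross t hp a (by simp)
    omega
  · rcases List.mem_cons.mp hc with rfl | hc2
    · omega
    · cases hc2

-- ---- scan characterisations ----
theorem leftScan_le (h : List Int) (hj : Int) (j : Nat) : pvLeftScan h hj j ≤ j := by
  induction j with
  | zero => simp [pvLeftScan]
  | succ l ih => simp only [pvLeftScan]; split; · omega
                 · omega

theorem leftScan_interior (h : List Int) (hj : Int) (j : Nat) :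
    ∀ t, pvLeftScan h hj j ≤ t → t < j → hj ≤ h.getD t 0 := by
  induction j with
  | zero => intro t _ ht; omega
  | succ l ih =>
    intro t h1 h2
    by_cases hc : hj ≤ h.getD l 0
    · simp only [pvLeftScan, if_pos hc] at h1
      rcases Nat.lt_or_ge t l with h3 | h3
      · exact ih t h1 h3
      · have : t = l := by omega
        subst this; exact hc
    · simp only [pvLeftScan, if_neg hc] at h1
      omega

theorem leftScan_boundary (h : List Int) (hj : Int) (j : Nat) :
    pvLeftScan h hj j = 0 ∨ (0 < pvLeftScan h hj j ∧ h.getD (pvLeftScan h hj j - 1) 0 < hj) := by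
  induction j with
  | zero => left; rfl
  | succ l ih =>
    by_cases hc : hj ≤ h.getD l 0
    · simpa only [pvLeftScan, if_pos hc] using ih
    · right
      simp only [pvLeftScan, if_neg hc]
      exact ⟨Nat.succ_pos l, by simpa using lt_of_not_ge hc⟩

theorem leftScan_unique (h : List Int) (hj : Int) (j l : Nat)
    (hle : l ≤ j)
    (hint : ∀ t, l ≤ t → t < j → hj ≤ h.getD t 0)
    (hbd : l = 0 ∨ (0 < l ∧ h.getD (l - 1) 0 < hj)) :
    pvLeftScan h hj j = l := by
  rcases Nat.lt_trichotomy (pvLeftScan h hj j) l with hlt | heq | hgt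
  · rcases hbd with rfl | ⟨hpos, hsm⟩
    · omega
    · have := leftScan_interior h hj j (l - 1) (by omega) (by omega)
      omega
  · exact heq
  · rcases leftScan_boundary h hj j with hz | ⟨hpos, hsm⟩
    · omega
    · have hle := leftScan_le h hj j
      have := hint (pvLeftScan h hj j - 1) (by omega) (by omega)
      omega

theorem rightScan_ge (h : List Int) (hj : Int) (n r : Nat) : r ≤ pvRightScan h hj n r := by
  induction r using pvRightScan.induct h hj n with
  | case1 r hr hc ih => rw [pvRightScan, if_pos hr, if_pos hc]; omega
  | case2 r hr hc => rw [pvRightScan, if_pos hr, if_neg hc]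
  | case3 r hr => rw [pvRightScan, if_neg hr]

theorem rightScan_le (h : List Int) (hj : Int) (n r : Nat) (hr : r ≤ n) :
    pvRightScan h hj n r ≤ n := by
  induction r using pvRightScan.induct h hj n with
  | case1 r hr2 hc ih => rw [pvRightScan, if_pos hr2, if_pos hc]; exact ih (by omega)
  | case2 r hr2 hc => rw [pvRightScan, if_pos hr2, if_neg hc]; omega
  | case3 r hr2 => rw [pvRightScan, if_neg hr2]; exact hr

theorem rightScan_interior (h : List Int) (hj : Int) (n r : Nat) :
    ∀ t, r ≤ t → t < pvRightScan h hj n r → hj < h.getD t 0 := by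
  induction r using pvRightScan.induct h hj n with
  | case1 r hr hc ih =>
    intro t h1 h2
    rw [pvRightScan, if_pos hr, if_pos hc] at h2
    rcases Nat.lt_or_ge t (r + 1) with h3 | h3
    · have : t = r := by omega
      subst this; exact hc
    · exact ih t h3 h2
  | case2 r hr hc => intro t h1 h2; rw [pvRightScan, if_pos hr, if_neg hc] at h2; omega
  | case3 r hr => intro t h1 h2; rw [pvRightScan, if_neg hr] at h2; omega

theorem rightScan_boundary (h : List Int) (hj : Int) (n r : Nat) (hr : r ≤ n) :
    pvRightScan h hj n r = n ∨ h.getD (pvRightScan h hj n r) 0 ≤ hj := by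
  induction r using pvRightScan.induct h hj n with
  | case1 r hr2 hc ih => rw [pvRightScan, if_pos hr2, if_pos hc]; exact ih (by omega)
  | case2 r hr2 hc => rw [pvRightScan, if_pos hr2, if_neg hc]; right; exact le_of_not_gt hc
  | case3 r hr2 => rw [pvRightScan, if_neg hr2]; left; omega

-- ---- fold-max utilities ----
theorem foldl_max_ge_init (f : Nat → Int) (l : List Nat) :
    ∀ b : Int, b ≤ l.foldl (fun b j => max b (f j)) b := by
  induction l with
  | nil => intro b; simp
  | cons x l ih =>
    intro b
    simp only [List.foldl_cons]
    exact le_trans (le_max_left b (f x)) (ih _)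

theorem foldl_max_ge_mem (f : Nat → Int) (l : List Nat) (j : Nat) (hj : j ∈ l) :
    ∀ b : Int, f j ≤ l.foldl (fun b j => max b (f j)) b := by
  induction l with
  | nil => cases hj
  | cons x l ih =>
    intro b
    simp only [List.foldl_cons]
    rcases List.mem_cons.mp hj with rfl | hmem
    · exact le_trans (le_max_right b (f j)) (foldl_max_ge_init f l _)
    · exact ih hmem _

theorem foldl_max_le (f : Nat → Int) (l : List Nat) (C : Int)
    (hC : ∀ j ∈ l, f j ≤ C) :
    ∀ b : Int, b ≤ C → l.foldl (fun b j => max b (f j)) b ≤ C := by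
  induction l with
  | nil => intro b hb; simpa using hb
  | cons x l ih =>
    intro b hb
    simp only [List.foldl_cons]
    exact ih (fun j hj => hC j (List.mem_cons_of_mem _ hj)) _
      (max_le hb (hC x (List.mem_cons_self)))

-- ---- acc bookkeeping for the pop loop ----
theorem pvPopN_acc_mono (hs : List Int) (i : Nat) (ht : Int) :
    ∀ (s : List Nat) (acc : Int), acc ≤ (pvPopN hs i ht s acc).2 := by
  intro s
  induction s with
  | nil => intro acc; simp [pvPopN]
  | cons p rest ih =>
    intro acc
    rw [pvPopN_cons]
    by_cases hc : ht ≤ hs.getD p 0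
    · rw [if_pos hc]
      exact le_trans (le_max_right _ _) (ih _)
    · rw [if_neg hc]

theorem fold_acc_mono (hs xs : List Int) :
    ∀ (l : List Nat) (p : List Nat × Int), p.2 ≤ (l.foldl (pvStepN hs xs) p).2 := by
  intro l
  induction l with
  | nil => intro p; simp
  | cons k l ih =>
    intro p
    simp only [List.foldl_cons]
    exact le_trans (pvPopN_acc_mono hs k (xs.getD k 0) p.1 p.2) (ih _)

-- the term B computes for bar j
def pvTermB (hs : List Int) (j : Nat) : Int :=
  hs.getD j 0 *
    ((pvRightScan hs (hs.getD j 0) hs.length (j + 1) : Int) - (pvLeftScan hs (hs.getD j 0) j : Int))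

-- when j sits on the stack, the element below it determines B's left boundary for j
theorem width_left (hs : List Int) (i j : Nat) (rest : List Nat)
    (hn : i ≤ hs.length) (hjn : j < hs.length)
    (hsuf : (j :: rest) <:+ pvStk (hs ++ [0]) i) :
    (pvLeftScan hs (hs.getD j 0) j : Int) =
      (match rest with | q :: _ => (q : Int) + 1 | [] => 0) := by
  have hjm : j ∈ pvStk (hs ++ [0]) i := hsuf.mem List.mem_cons_self
  cases rest with
  | nil =>
    have hnb := suffix_no_below (hs ++ [0]) i j hsuf
    have hge := gap_ge (hs ++ [0]) i j (fun _ => True) hjm (fun _ _ _ _ => trivial)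
      (fun t _ ht => hnb t ht)
    have := leftScan_unique hs (hs.getD j 0) j 0 (by omega)
      (fun t _ htj => by
        have h1 := hge t trivial htj
        have he1 : (hs ++ [0]).getD j 0 = hs.getD j 0 := List.getD_append _ _ _ _ hjn
        have he2 : (hs ++ [0]).getD t 0 = hs.getD t 0 := List.getD_append _ _ _ _ (by omega)
        rw [he1, he2] at h1
        exact h1)
      (Or.inl rfl)
    rw [this]
    rfl
  | cons q rest2 =>
    have hqm : q ∈ pvStk (hs ++ [0]) i := hsuf.mem (by simp)
    have hqj : q < j ∧ (hs ++ [0]).getD q 0 < (hs ++ [0]).getD j 0 := by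
      have hpwg := pairwise_pvStk_g (hs ++ [0]) i
      rcases hsuf with ⟨pre, hpre⟩
      rw [← hpre] at hpwg
      rcases List.pairwise_append.mp hpwg with ⟨_, hsufp, _⟩
      rcases List.pairwise_cons.mp hsufp with ⟨hj2, _⟩
      exact hj2 q (by simp)
    have hnb := suffix_no_between (hs ++ [0]) i j q rest2 hsuf
    have hge := gap_ge (hs ++ [0]) i j (fun t => q < t) hjm (fun t u h1 h2 => by omega)
      (fun t h1 h2 => hnb t h1 h2)
    have hql : q < hs.length := by omega
    have := leftScan_unique hs (hs.getD j 0) j (q + 1) (by omega)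
      (fun t ht1 htj => by
        have h1 := hge t (by omega) htj
        have he1 : (hs ++ [0]).getD j 0 = hs.getD j 0 := List.getD_append _ _ _ _ hjn
        have he2 : (hs ++ [0]).getD t 0 = hs.getD t 0 := List.getD_append _ _ _ _ (by omega)
        rw [he1, he2] at h1
        exact h1)
      (Or.inr ⟨by omega, by
        have h2 := hqj.2
        have he1 : (hs ++ [0]).getD j 0 = hs.getD j 0 := List.getD_append _ _ _ _ hjn
        have he2 : (hs ++ [0]).getD q 0 = hs.getD q 0 := List.getD_append _ _ _ _ hql
        rw [he1, he2] at h2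
        simpa using h2⟩)
    rw [this]
    push_cast
    rfl

theorem pop_time_le_rightScan (hs : List Int) (i j : Nat)
    (hn : i ≤ hs.length) (hj : j ∈ pvStk (hs ++ [0]) i) :
    i ≤ pvRightScan hs (hs.getD j 0) hs.length (j + 1) := by
  rcases (mem_pvStk _ _ _).mp hj with ⟨hji, hprop⟩
  by_contra hR
  rw [not_le] at hR
  set R := pvRightScan hs (hs.getD j 0) hs.length (j + 1) with hRdef
  have h1 : j + 1 ≤ R := rightScan_ge hs (hs.getD j 0) hs.length (j + 1)
  have h2 : R < hs.length := by omega
  have h3 : (hs ++ [0]).getD j 0 < (hs ++ [0]).getD R 0 := hprop R (by omega) (by omega)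
  rcases rightScan_boundary hs (hs.getD j 0) hs.length (j + 1) (by omega) with h4 | h4
  · rw [← hRdef] at h4
    omega
  · rw [← hRdef] at h4
    have he1 : (hs ++ [0]).getD j 0 = hs.getD j 0 := List.getD_append _ _ _ _ (by omega)
    have he2 : (hs ++ [0]).getD R 0 = hs.getD R 0 := List.getD_append _ _ _ _ h2
    rw [he1, he2] at h3
    omega

theorem pvPopN_acc_le (hs : List Int) (i : Nat) (C : Int)
    (hnn : ∀ x ∈ hs, 0 ≤ x) (hn : i ≤ hs.length)
    (hterm : ∀ j, j < hs.length → pvTermB hs j ≤ C) :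
    ∀ (s : List Nat) (acc : Int), s <:+ pvStk (hs ++ [0]) i → acc ≤ C →
      (pvPopN hs i ((hs ++ [0]).getD i 0) s acc).2 ≤ C := by
  intro s
  induction s with
  | nil => intro acc _ hacc; exact hacc
  | cons j rest ih =>
    intro acc hsuf hacc
    rw [pvPopN_cons]
    by_cases hc : (hs ++ [0]).getD i 0 ≤ hs.getD j 0
    · rw [if_pos hc]
      have hjm : j ∈ pvStk (hs ++ [0]) i := hsuf.mem List.mem_cons_self
      have hji : j < i := ((mem_pvStk _ _ _).mp hjm).1
      have hjn : j < hs.length := by omega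
      have hwl := width_left hs i j rest hn hjn hsuf
      have hR := pop_time_le_rightScan hs i j hn hjm
      have hhj0 : 0 ≤ hs.getD j 0 := by
        rw [List.getD_eq_getElem hs 0 hjn]
        exact hnn _ (List.getElem_mem hjn)
      have hRc : (i : Int) ≤ (pvRightScan hs (hs.getD j 0) hs.length (j + 1) : Int) := by
        exact_mod_cast hR
      refine ih _ ((List.suffix_cons j rest).trans hsuf)
        (max_le (le_trans ?_ (hterm j hjn)) hacc)
      cases rest with
      | nil =>
        have hwl0 : (pvLeftScan hs (hs.getD j 0) j : Int) = 0 := hwl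
        show hs.getD j 0 * (i : Int) ≤ pvTermB hs j
        unfold pvTermB
        exact mul_le_mul_of_nonneg_left (by omega) hhj0
      | cons q r2 =>
        have hwl1 : (pvLeftScan hs (hs.getD j 0) j : Int) = (q : Int) + 1 := hwl
        show hs.getD j 0 * ((i : Int) - (q : Int) - 1) ≤ pvTermB hs j
        unfold pvTermB
        exact mul_le_mul_of_nonneg_left (by omega) hhj0
    · rw [if_neg hc]
      exact hacc

theorem pvPopN_acc_ge (hs : List Int) (i : Nat) (ht : Int) :
    ∀ (s1 : List Nat) (j : Nat) (s2 : List Nat) (acc : Int),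
      (∀ t ∈ s1, ht ≤ hs.getD t 0) → ht ≤ hs.getD j 0 →
      hs.getD j 0 * (match s2 with | q :: _ => (i : Int) - (q : Int) - 1 | [] => (i : Int)) ≤
        (pvPopN hs i ht (s1 ++ j :: s2) acc).2 := by
  intro s1
  induction s1 with
  | nil =>
    intro j s2 acc _ hj
    rw [List.nil_append, pvPopN_cons, if_pos hj]
    exact le_trans (le_max_left _ _) (pvPopN_acc_mono hs i ht s2 _)
  | cons p s1' ih =>
    intro j s2 acc hall hj
    rw [List.cons_append, pvPopN_cons, if_pos (hall p List.mem_cons_self)]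
    exact ih j s2 _ (fun t ht2 => hall t (List.mem_cons_of_mem _ ht2)) hj

-- ---- the per-row theorem ----
theorem row_le (hs : List Int) (a : Int) (hnn : ∀ x ∈ hs, 0 ≤ x) :
    ((List.range (hs.length + 1)).foldl (pvStepN hs (hs ++ [0])) ([], a)).2 ≤ pvRowB hs a := by
  have hterm : ∀ j, j < hs.length → pvTermB hs j ≤ pvRowB hs a := by
    intro j hj
    have := foldl_max_ge_mem (pvTermB hs) (List.range hs.length) j (List.mem_range.mpr hj) a
    simpa [pvRowB, pvTermB] using this
  have H : ∀ i, i ≤ hs.length + 1 →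
      ((List.range i).foldl (pvStepN hs (hs ++ [0])) ([], a)).2 ≤ pvRowB hs a := by
    intro i
    induction i with
    | zero =>
      intro _
      have := foldl_max_ge_init (pvTermB hs) (List.range hs.length) a
      simpa [pvRowB, pvTermB] using this
    | succ i ihi =>
      intro hi1
      rw [List.range_succ, List.foldl_append, List.foldl_cons, List.foldl_nil]
      have hstk := stack_run hs a i (by omega)
      have hac := ihi (by omega)
      rcases heq : (List.range i).foldl (pvStepN hs (hs ++ [0])) ([], a) with ⟨st, ac⟩
      rw [heq] at hstk hac
      simp only at hstk hac
      subst hstk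
      show (pvPopN hs i ((hs ++ [0]).getD i 0) (pvStk (hs ++ [0]) i) ac).2 ≤ pvRowB hs a
      exact pvPopN_acc_le hs i (pvRowB hs a) hnn (by omega) hterm _ ac (List.suffix_refl _) hac
  exact H (hs.length + 1) (le_refl _)

theorem row_ge (hs : List Int) (a : Int) (hnn : ∀ x ∈ hs, 0 ≤ x) :
    pvRowB hs a ≤ ((List.range (hs.length + 1)).foldl (pvStepN hs (hs ++ [0])) ([], a)).2 := by
  set A := ((List.range (hs.length + 1)).foldl (pvStepN hs (hs ++ [0])) ([], a)).2 with hA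
  have hinit : a ≤ A := by
    rw [hA]
    exact fold_acc_mono hs (hs ++ [0]) (List.range (hs.length + 1)) ([], a)
  have hterms : ∀ j ∈ List.range hs.length, pvTermB hs j ≤ A := by
    intro j hjmem
    have hjn : j < hs.length := List.mem_range.mp hjmem
    have hhj0 : 0 ≤ hs.getD j 0 := by
      rw [List.getD_eq_getElem hs 0 hjn]
      exact hnn _ (List.getElem_mem hjn)
    set R := pvRightScan hs (hs.getD j 0) hs.length (j + 1) with hRdef
    have hR1 : j + 1 ≤ R := rightScan_ge hs (hs.getD j 0) hs.length (j + 1)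
    have hRn : R ≤ hs.length := rightScan_le hs (hs.getD j 0) hs.length (j + 1) (by omega)
    have hjR : j ∈ pvStk (hs ++ [0]) R := by
      rw [mem_pvStk]
      refine ⟨by omega, ?_⟩
      intro t ht htj
      have h5 := rightScan_interior hs (hs.getD j 0) hs.length (j + 1) t (by omega) (by omega)
      have he1 : (hs ++ [0]).getD j 0 = hs.getD j 0 := List.getD_append _ _ _ _ hjn
      have he2 : (hs ++ [0]).getD t 0 = hs.getD t 0 := List.getD_append _ _ _ _ (by omega)
      rw [he1, he2]
      exact h5
    obtain ⟨s1, s2, hdecomp⟩ := List.append_of_mem hjR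
    have hsuf : (j :: s2) <:+ pvStk (hs ++ [0]) R := ⟨s1, hdecomp.symm⟩
    have hwl := width_left hs R j s2 hRn hjn hsuf
    have hhtle : (hs ++ [0]).getD R 0 ≤ hs.getD j 0 := by
      rcases Nat.lt_or_ge R hs.length with hRl | hRl
      · have he : (hs ++ [0]).getD R 0 = hs.getD R 0 := List.getD_append _ _ _ _ hRl
        rw [he]
        rcases rightScan_boundary hs (hs.getD j 0) hs.length (j + 1) (by omega) with h4 | h4
        · rw [← hRdef] at h4; omega
        · rw [← hRdef] at h4; exact h4
      · have hRe : R = hs.length := by omega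
        have he : (hs ++ [0]).getD R 0 = 0 := by
          rw [hRe, List.getD_eq_getElem?_getD, List.getElem?_concat_length]
          rfl
        rw [he]
        exact hhj0
    have hts1 : ∀ t ∈ s1, (hs ++ [0]).getD R 0 ≤ hs.getD t 0 := by
      intro t hts
      have htm : t ∈ pvStk (hs ++ [0]) R := by
        rw [hdecomp]
        exact List.mem_append.mpr (Or.inl hts)
      have htR : t < R := ((mem_pvStk _ _ _).mp htm).1
      have htj : j < t := by
        have hpw := pairwise_pvStk (hs ++ [0]) R
        rw [hdecomp] at hpw
        rcases List.pairwise_append.mp hpw with ⟨_, _, hcross⟩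
        exact hcross t hts j List.mem_cons_self
      have h6 : (hs ++ [0]).getD j 0 < (hs ++ [0]).getD t 0 :=
        ((mem_pvStk _ _ _).mp hjR).2 t htR htj
      have he1 : (hs ++ [0]).getD j 0 = hs.getD j 0 := List.getD_append _ _ _ _ hjn
      have he2 : (hs ++ [0]).getD t 0 = hs.getD t 0 := List.getD_append _ _ _ _ (by omega)
      rw [he1, he2] at h6
      omega
    have hsplit : hs.length + 1 = (R + 1) + (hs.length - R) := by omega
    rw [hA, hsplit, List.range_add, List.foldl_append]
    refine le_trans ?_ (fold_acc_mono hs (hs ++ [0]) _ _)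
    rw [List.range_succ, List.foldl_append, List.foldl_cons, List.foldl_nil]
    have hstk := stack_run hs a R (by omega)
    rcases heq : (List.range R).foldl (pvStepN hs (hs ++ [0])) ([], a) with ⟨st, ac⟩
    rw [heq] at hstk
    simp only at hstk
    subst hstk
    show pvTermB hs j ≤ (pvPopN hs R ((hs ++ [0]).getD R 0) (pvStk (hs ++ [0]) R) ac).2
    have hge := pvPopN_acc_ge hs R ((hs ++ [0]).getD R 0) s1 j s2 ac hts1 hhtle
    rw [← hdecomp] at hge
    refine le_trans ?_ hge
    cases s2 with
    | nil =>
      have hwl0 : (pvLeftScan hs (hs.getD j 0) j : Int) = 0 := hwl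
      show pvTermB hs j ≤ hs.getD j 0 * (R : Int)
      unfold pvTermB
      rw [← hRdef]
      exact mul_le_mul_of_nonneg_left (by omega) hhj0
    | cons q r2 =>
      have hwl1 : (pvLeftScan hs (hs.getD j 0) j : Int) = (q : Int) + 1 := hwl
      show pvTermB hs j ≤ hs.getD j 0 * ((R : Int) - (q : Int) - 1)
      unfold pvTermB
      rw [← hRdef]
      exact mul_le_mul_of_nonneg_left (by omega) hhj0
  have := foldl_max_le (pvTermB hs) (List.range hs.length) A hterms a hinit
  simpa [pvRowB, pvTermB] using this

theorem row_eq (hs : List Int) (a : Int) (hnn : ∀ x ∈ hs, 0 ≤ x) :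
    ((List.range (hs.length + 1)).foldl (pvStepN hs (hs ++ [0])) ([], a)).2 = pvRowB hs a :=
  le_antisymm (row_le hs a hnn) (row_ge hs a hnn)

-- ---- heights update preserves nonnegativity ----
theorem foldUpd_nonneg (row : List String) :
    ∀ (idxs : List Int) (h : List Int), (∀ i ∈ idxs, 0 ≤ i) → (∀ x ∈ h, 0 ≤ x) →
      ∀ x ∈ idxs.foldl (fun h i => PySem.List.pySetD h i
        (if PySem.List.pyGetD row i "" = "1" then PySem.List.pyGetD h i 0 + 1 else 0)) h,
        0 ≤ x := by
  intro idxs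
  induction idxs with
  | nil => intro h _ hnn; simpa using hnn
  | cons i idxs ih =>
    intro h hidx hnn
    rw [List.foldl_cons]
    have h0i : 0 ≤ i := hidx i List.mem_cons_self
    refine ih _ (fun t ht => hidx t (List.mem_cons_of_mem _ ht)) ?_
    intro x hx
    rw [PySem.List.pySetD_of_nonneg _ _ h0i] at hx
    rcases List.mem_or_eq_of_mem_set hx with hmem | rfl
    · exact hnn x hmem
    · split
      · have hg : 0 ≤ PySem.List.pyGetD h i 0 := by
          have hcast : i = ((i.toNat : Nat) : Int) := by omega
          rw [hcast, PySem.List.pyGetD_natCast]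
          rcases Nat.lt_or_ge i.toNat h.length with hlt | hge
          · rw [List.getD_eq_getElem h 0 hlt]
            exact hnn _ (List.getElem_mem hlt)
          · rw [List.getD_eq_default h 0 hge]
        omega
      · omega

theorem heightsUpd_nonneg (h : List Int) (row : List String) (hnn : ∀ x ∈ h, 0 ≤ x) :
    ∀ x ∈ pvHeightsUpd h row, 0 ≤ x := by
  unfold pvHeightsUpd
  refine foldUpd_nonneg row _ h ?_ hnn
  intro i hi
  have := (PySem.List.mem_pyRange_one).mp hi
  omega

-- ---- rows fold ----
theorem rows_eq (rows : List (List String)) :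
    ∀ (h : List Int) (a : Int), (∀ x ∈ h, 0 ≤ x) →
      rows.foldl pvRowA (h, a) =
        rows.foldl (fun (st : List Int × Int) row =>
          let h := pvHeightsUpd st.1 row
          (h, pvRowB h st.2)) (h, a) := by
  induction rows with
  | nil => intro h a _; rfl
  | cons row rows ih =>
    intro h a hnn
    simp only [List.foldl_cons]
    have hnn2 := heightsUpd_nonneg h row hnn
    rw [rowA_eq_natfold h a row, row_eq _ a hnn2]
    exact ih _ _ hnn2

-- ===== VERDICT (by name: the statement is the Claim_ definition above) =====
theorem max_rectangle_in_matrix_spec : Claim_equal_max_rectangle_in_matrix := by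
  intro matrix _ _
  unfold Spec_max_rectangle_in_matrix
  unfold max_rectangle_in_matrix max_rectangle_in_matrix_alt
  by_cases h0 : matrix = []
  · simp [h0]
  · by_cases h1 : matrix = [[]]
    · subst h1; decide
    · rw [if_neg (by simp [h0, h1]), if_neg h0,
        rows_eq matrix (List.replicate (matrix.headD []).length 0) 0
          (by intro x hx; have := List.eq_of_mem_replicate hx; omega)]
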